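-- pv_equiv track=rewrite | github.com/BlackAWhite8/system | task2/task.py | create_dominance_matrix
-- ===== SOURCE A (Python) =====
-- from typing import List, Dict, Any, Set
--
-- def get_element_positions(ranking: List[List[str]]) -> Dict[str, tuple]:
--
--     positions = {}
--     for level, cluster in enumerate(ranking):
--         for pos_in_cluster, element in enumerate(cluster):
--             positions[element] = (level, pos_in_cluster)
--     return positions
--
-- def compare_positions(pos1: tuple, pos2: tuple) -> int:
--
--     level1, pos_in_cluster1 = pos1
--     level2, pos_in_cluster2 = pos2
--
--     if level1 < level2:
--         return 1
--     elif level1 > level2: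
--         return -1
--     else:
--         if pos_in_cluster1 < pos_in_cluster2:
--             return 1
--         elif pos_in_cluster1 > pos_in_cluster2:
--             return -1
--         else:
--             return 0
--
-- def create_dominance_matrix(ranking1: List[List[str]], ranking2: List[List[str]],
--                             elements: Set[str]) -> Dict[str, Dict[str, int]]:
--
--     pos1 = get_element_positions(ranking1)
--     pos2 = get_element_positions(ranking2)
--
--     matrix = {elem: {} for elem in elements}
--     elements_list = list(elements)
--
--     for i in range(len(elements_list)):
--         for j in range(i + 1, len(elements_list)):
--             elem1, elem2 = elements_list[i], elements_list[j]
--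
--             rel1 = compare_positions(pos1[elem1], pos1[elem2])
--             rel2 = compare_positions(pos2[elem1], pos2[elem2])
--
--             if rel1 == rel2 and rel1 != 0:
--                 value = rel1
--             else:
--                 value = 0
--
--             matrix[elem1][elem2] = value
--             matrix[elem2][elem1] = -value
--
--     return matrix
-- ===== SOURCE B (Python) =====
-- def create_dominance_matrix(ranking1, ranking2, elements):
--     # For every element, precompute the SET of elements occurring strictly after
--     # its last occurrence in the flattened ranking (one backward scan per ranking);
--     # x dominates y in a ranking iff y is in x's after-set.  Each matrix row is
--     # then built directly in a single pass over elements (no index arithmetic,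
--     # no triangular symmetric fill, no tuple comparator).
--     def after_sets(ranking):
--         after = {}
--         seen = set()
--         flat = [e for cluster in ranking for e in cluster]
--         for e in reversed(flat):
--             if e not in after:
--                 after[e] = set(seen)
--             seen.add(e)
--         return after
--
--     after1 = after_sets(ranking1)
--     after2 = after_sets(ranking2)
--
--     matrix = {}
--     for e1 in elements:
--         row = {}
--         for e2 in elements:
--             if e2 == e1:
--                 continue
--             if e2 in after1[e1] and e2 in after2[e1]:
--                 row[e2] = 1
--             elif e1 in after1[e2] and e1 in after2[e2]:
--                 row[e2] = -1
--             else: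
--                 row[e2] = 0
--         matrix[e1] = row
--     return matrix
-- ===== Notes on version B (the rewrite author's own statement) =====
-- stated objective: alternative
-- what changed: Replaces the (level,pos)-tuple position dicts, the compare_positions comparator and the triangular symmetric index loop by per-element 'after'-sets built in one backward scan of each flattened ranking, with every matrix row then built directly by set-membership tests in a single pass over elements.
import Mathlib
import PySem

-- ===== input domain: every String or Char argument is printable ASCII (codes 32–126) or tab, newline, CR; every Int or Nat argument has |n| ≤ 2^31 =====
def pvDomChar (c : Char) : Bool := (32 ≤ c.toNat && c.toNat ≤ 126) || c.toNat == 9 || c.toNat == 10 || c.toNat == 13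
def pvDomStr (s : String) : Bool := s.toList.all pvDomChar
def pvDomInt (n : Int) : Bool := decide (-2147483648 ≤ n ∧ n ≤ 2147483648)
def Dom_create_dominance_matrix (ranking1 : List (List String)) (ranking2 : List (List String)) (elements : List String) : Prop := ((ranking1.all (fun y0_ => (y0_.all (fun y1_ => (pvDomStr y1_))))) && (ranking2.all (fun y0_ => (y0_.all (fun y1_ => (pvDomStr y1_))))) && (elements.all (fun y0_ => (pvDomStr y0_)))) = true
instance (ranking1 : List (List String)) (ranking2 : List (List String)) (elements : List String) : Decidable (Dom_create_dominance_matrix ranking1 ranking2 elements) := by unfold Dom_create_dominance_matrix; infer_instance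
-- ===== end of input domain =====

-- B replaces the tuple position dicts, the compare_positions comparator and the triangular
-- symmetric index loop by per-element "after"-sets (elements occurring after an element's last
-- occurrence in the flattened ranking) built by one backward scan, with each matrix row built
-- directly by set-membership tests in a single pass (objective: alternative, not faster).


-- ===== PORT A =====
-- for level, cluster in enumerate(ranking): for pos, element in enumerate(cluster): positions[element] = (level, pos)
-- (enumerate ported as a running Int counter carried in the fold state)
def get_element_positions (ranking : List (List String)) : PySem.Dict String (Int × Int) :=
  (ranking.foldl
    (fun (acc : PySem.Dict String (Int × Int) × Int) cluster =>
      ((cluster.foldl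
          (fun (acc2 : PySem.Dict String (Int × Int) × Int) element =>
            (acc2.1.insert element (acc.2, acc2.2), acc2.2 + 1))
          (acc.1, 0)).1,
       acc.2 + 1))
    (PySem.Dict.empty, 0)).1

def compare_positions (pos1 : Int × Int) (pos2 : Int × Int) : Int :=
  if pos1.1 < pos2.1 then 1
  else if pos1.1 > pos2.1 then -1
  else if pos1.2 < pos2.2 then 1
  else if pos1.2 > pos2.2 then -1
  else 0

-- pos1[elem] raises KeyError when elem is missing: Pre_ excludes that; getD's default is never read inside Pre_.
def create_dominance_matrix (ranking1 : List (List String)) (ranking2 : List (List String)) (elements : List String) : List (String × List (String × Int)) :=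
  let pos1 := get_element_positions ranking1
  let pos2 := get_element_positions ranking2
  let matrix : PySem.Dict String (PySem.Dict String Int) :=
    elements.foldl (fun m e => m.insert e PySem.Dict.empty) PySem.Dict.empty
  let n : Int := elements.length
  let final :=
    (PySem.List.pyRange 0 n 1).foldl (fun m i =>
      (PySem.List.pyRange (i + 1) n 1).foldl (fun m j =>
        let elem1 := PySem.List.pyGetD elements i ""
        let elem2 := PySem.List.pyGetD elements j ""
        let rel1 := compare_positions (pos1.getD elem1 (0, 0)) (pos1.getD elem2 (0, 0))
        let rel2 := compare_positions (pos2.getD elem1 (0, 0)) (pos2.getD elem2 (0, 0))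
        let value := if rel1 = rel2 ∧ rel1 ≠ 0 then rel1 else 0
        let m := m.modify elem1 PySem.Dict.empty (fun row => row.insert elem2 value)
        m.modify elem2 PySem.Dict.empty (fun row => row.insert elem1 (-value))) m) matrix
  final.items.map (fun p => (p.1, p.2.items))

-- ===== PORT B =====
-- flat = [e for cluster in ranking for e in cluster]; backward scan: first time an element is
-- seen from the back (= its last occurrence), record a copy of the 'seen' set; then seen.add(e).
def after_sets (ranking : List (List String)) : PySem.Dict String (PySem.Set String) :=
  ((ranking.flatMap (fun cluster => cluster)).reverse.foldl
    (fun (acc : PySem.Dict String (PySem.Set String) × PySem.Set String) e =>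
      (if acc.1.contains e then acc.1 else acc.1.insert e (PySem.Set.ofList acc.2),
       PySem.Set.add acc.2 e))
    (PySem.Dict.empty, PySem.Set.empty)).1

-- after1[e1] raises KeyError when e1 is missing: Pre_ excludes that; getD's default is never read inside Pre_.
def create_dominance_matrix_alt (ranking1 : List (List String)) (ranking2 : List (List String)) (elements : List String) : List (String × List (String × Int)) :=
  let after1 := after_sets ranking1
  let after2 := after_sets ranking2
  let matrix : PySem.Dict String (PySem.Dict String Int) :=
    elements.foldl (fun m e1 =>
      let row : PySem.Dict String Int :=
        elements.foldl (fun row e2 =>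
          if e2 == e1 then row
          else if PySem.Set.contains (after1.getD e1 PySem.Set.empty) e2 &&
                  PySem.Set.contains (after2.getD e1 PySem.Set.empty) e2 then row.insert e2 1
          else if PySem.Set.contains (after1.getD e2 PySem.Set.empty) e1 &&
                  PySem.Set.contains (after2.getD e2 PySem.Set.empty) e1 then row.insert e2 (-1)
          else row.insert e2 0) PySem.Dict.empty
      m.insert e1 row) PySem.Dict.empty
  matrix.items.map (fun p => (p.1, p.2.items))

-- ===== PRECONDITION & SPEC =====
-- Pre_ excludes exactly the inputs where A raises KeyError (two or more elements and some
-- element of `elements` missing from a ranking — B raises there too).  The Nodup conjunct is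
-- the set type convention: `elements` is a Python set, whose List encoding holds distinct
-- elements, so it excludes nothing A can be called on.
def Pre_create_dominance_matrix (ranking1 : List (List String)) (ranking2 : List (List String)) (elements : List String) : Prop :=
  elements.Nodup ∧
    (elements.length ≤ 1 ∨ ∀ e ∈ elements, e ∈ ranking1.flatten ∧ e ∈ ranking2.flatten)
instance (ranking1 : List (List String)) (ranking2 : List (List String)) (elements : List String) : Decidable (Pre_create_dominance_matrix ranking1 ranking2 elements) := by unfold Pre_create_dominance_matrix; infer_instance

def pvWitness_create_dominance_matrix : List (List String) × List (List String) × List String :=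
  ([["a"], ["b", "c"]], [["c", "b"], ["a"]], ["a", "b", "c"])

def Spec_create_dominance_matrix (ranking1 : List (List String)) (ranking2 : List (List String)) (elements : List String) (out : List (String × List (String × Int))) : Prop := out = create_dominance_matrix_alt ranking1 ranking2 elements
instance (ranking1 : List (List String)) (ranking2 : List (List String)) (elements : List String) (out : List (String × List (String × Int))) : Decidable (Spec_create_dominance_matrix ranking1 ranking2 elements out) := by unfold Spec_create_dominance_matrix; infer_instance

-- ===== CLAIM (what is proved, stated in full; the proofs are below) =====
def Claim_equal_create_dominance_matrix : Prop := ∀ (ranking1 : List (List String)) (ranking2 : List (List String)) (elements : List String), Dom_create_dominance_matrix ranking1 ranking2 elements → Pre_create_dominance_matrix ranking1 ranking2 elements → Spec_create_dominance_matrix ranking1 ranking2 elements (create_dominance_matrix ranking1 ranking2 elements)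

-- ===== LEMMAS AND PROOFS =====

-- ---------- proof-side values: the per-pair entry each port writes ----------
def pvVal (ranking1 ranking2 : List (List String)) (a b : String) : Int :=
  let rel1 := compare_positions ((get_element_positions ranking1).getD a (0, 0)) ((get_element_positions ranking1).getD b (0, 0))
  let rel2 := compare_positions ((get_element_positions ranking2).getD a (0, 0)) ((get_element_positions ranking2).getD b (0, 0))
  if rel1 = rel2 ∧ rel1 ≠ 0 then rel1 else 0

def pvBVal (ranking1 ranking2 : List (List String)) (a b : String) : Int :=
  if PySem.Set.contains ((after_sets ranking1).getD a PySem.Set.empty) b &&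
     PySem.Set.contains ((after_sets ranking2).getD a PySem.Set.empty) b then 1
  else if PySem.Set.contains ((after_sets ranking1).getD b PySem.Set.empty) a &&
          PySem.Set.contains ((after_sets ranking2).getD b PySem.Set.empty) a then (-1)
  else 0

-- ---------- generic machinery for A's triangular pair loop ----------
def pvStep (v : String → String → Int) (m : PySem.Dict String (PySem.Dict String Int)) (a b : String) : PySem.Dict String (PySem.Dict String Int) :=
  (m.modify a PySem.Dict.empty (fun row => row.insert b (v a b))).modify b PySem.Dict.empty
    (fun row => row.insert a (-(v a b)))

def pvLoopS {M : Type} (g : M → String → String → M) : List String → M → M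
  | [], m => m
  | a :: rest, m => pvLoopS g rest (rest.foldl (fun m b => g m a b) m)

theorem pvShift {M : Type} (f : M → String → M) (x : String) (rest : List String)
    (a : Int) (ha : 0 ≤ a) (m : M) :
    (PySem.List.pyRange (a + 1) ((rest.length : Int) + 1) 1).foldl
        (fun m j => f m (PySem.List.pyGetD (x :: rest) j "")) m =
    (PySem.List.pyRange a (rest.length : Int) 1).foldl
        (fun m j => f m (PySem.List.pyGetD rest j "")) m := by
  rw [PySem.List.pyRange_one, PySem.List.pyRange_one]
  have hlen : (((rest.length : Int) + 1) - (a + 1)).toNat = ((rest.length : Int) - a).toNat := by omega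
  rw [hlen, List.foldl_map, List.foldl_map]
  apply PySem.List.foldl_congr_mem
  intro acc k hk
  congr 1
  rw [PySem.List.pyGetD_of_nonneg _ _ (by omega), PySem.List.pyGetD_of_nonneg _ _ (by omega)]
  have h2 : (a + 1 + (k : Int)).toNat = (a + (k : Int)).toNat + 1 := by omega
  rw [h2, List.getD_cons_succ]

theorem pvOuterShift {M : Type} (g : M → String → String → M) (x : String) (rest : List String) (m : M) :
    (PySem.List.pyRange 1 ((rest.length : Int) + 1) 1).foldl
      (fun m i => (PySem.List.pyRange (i + 1) ((rest.length : Int) + 1) 1).foldl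
        (fun m j => g m (PySem.List.pyGetD (x :: rest) i "") (PySem.List.pyGetD (x :: rest) j "")) m) m =
    (PySem.List.pyRange 0 (rest.length : Int) 1).foldl
      (fun m i => (PySem.List.pyRange (i + 1) (rest.length : Int) 1).foldl
        (fun m j => g m (PySem.List.pyGetD rest i "") (PySem.List.pyGetD rest j "")) m) m := by
  rw [PySem.List.pyRange_one, PySem.List.pyRange_one]
  have hlen : (((rest.length : Int) + 1) - 1).toNat = ((rest.length : Int) - 0).toNat := by omega
  rw [hlen, List.foldl_map, List.foldl_map]
  apply PySem.List.foldl_congr_mem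
  intro acc k hk
  have hk' : (k : Int) < (rest.length : Int) := by
    have := List.mem_range.mp hk; omega
  have e0 : (0 : Int) + (k : Int) = (k : Int) := by omega
  have e1 : (1 : Int) + (k : Int) = (k : Int) + 1 := by omega
  rw [e0, e1]
  have eg : PySem.List.pyGetD (x :: rest) ((k : Int) + 1) "" = PySem.List.pyGetD rest (k : Int) "" := by
    rw [PySem.List.pyGetD_of_nonneg _ _ (by omega), PySem.List.pyGetD_of_nonneg _ _ (by omega)]
    have h2 : ((k : Int) + 1).toNat = ((k : Int)).toNat + 1 := by omega
    rw [h2, List.getD_cons_succ]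
  rw [eg]
  exact pvShift (fun m y => g m (PySem.List.pyGetD rest (k : Int) "") y) x rest ((k : Int) + 1)
    (by omega) acc

theorem pvConv {M : Type} (g : M → String → String → M) (els : List String) (m₀ : M) :
    (PySem.List.pyRange 0 (els.length : Int) 1).foldl
      (fun m i => (PySem.List.pyRange (i + 1) (els.length : Int) 1).foldl
        (fun m j => g m (PySem.List.pyGetD els i "") (PySem.List.pyGetD els j "")) m) m₀ =
    pvLoopS g els m₀ := by
  induction els generalizing m₀ with
  | nil => simp [pvLoopS, PySem.List.pyRange_one]
  | cons x rest ih =>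
    have hpos : (0 : Int) < (((x :: rest).length : Int)) := by
      exact_mod_cast Nat.succ_pos rest.length
    rw [PySem.List.pyRange_one_cons hpos, List.foldl_cons, zero_add]
    have hx0 : PySem.List.pyGetD (x :: rest) 0 "" = x := by
      rw [PySem.List.pyGetD_ofNat']
      simp
    rw [hx0]
    rw [PySem.List.foldl_pyRange_pyGetD' (x :: rest) "" (fun acc b => g acc x b) m₀
      (by norm_num : (0 : Int) ≤ 1)]
    have hdrop : List.drop ((1 : Int)).toNat (x :: rest) = rest := by simp
    rw [hdrop]
    have hlen : (((x :: rest).length : Int)) = ((rest.length : Int)) + 1 := by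
      simp [List.length_cons]
    rw [hlen, pvOuterShift g x rest, ih]
    simp [pvLoopS]

-- per-block effect of A's inner loop on a single row (looked up with getD)
theorem pvBlock_getD_self (v : String → String → Int) (a : String) (rest : List String)
    (m : PySem.Dict String (PySem.Dict String Int)) (ha : a ∉ rest) :
    ((rest.foldl (fun m b => pvStep v m a b) m).getD a PySem.Dict.empty) =
      rest.foldl (fun r b => r.insert b (v a b)) (m.getD a PySem.Dict.empty) := by
  induction rest generalizing m with
  | nil => simp
  | cons b t ih =>
    have hab : a ≠ b := fun h => ha (by simp [h])
    have hat : a ∉ t := fun h => ha (by simp [h])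
    rw [List.foldl_cons, ih _ hat, List.foldl_cons]
    congr 1
    unfold pvStep
    rw [PySem.Dict.getD_modify_of_ne _ _ _ hab, PySem.Dict.getD_modify_self]

theorem pvBlock_getD_of_notmem (v : String → String → Int) (a : String) (rest : List String)
    (m : PySem.Dict String (PySem.Dict String Int)) (k : String) (hka : k ≠ a) (hk : k ∉ rest) :
    ((rest.foldl (fun m b => pvStep v m a b) m).getD k PySem.Dict.empty) = m.getD k PySem.Dict.empty := by
  induction rest generalizing m with
  | nil => simp
  | cons b t ih =>
    have hkb : k ≠ b := fun h => hk (by simp [h])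
    have hkt : k ∉ t := fun h => hk (by simp [h])
    rw [List.foldl_cons, ih _ hkt]
    unfold pvStep
    rw [PySem.Dict.getD_modify_of_ne _ _ _ hkb, PySem.Dict.getD_modify_of_ne _ _ _ hka]

theorem pvBlock_getD_mem (v : String → String → Int) (a : String) (rest : List String)
    (m : PySem.Dict String (PySem.Dict String Int)) (k : String) (hnd : rest.Nodup)
    (hk : k ∈ rest) (hka : k ≠ a) :
    ((rest.foldl (fun m b => pvStep v m a b) m).getD k PySem.Dict.empty) =
      (m.getD k PySem.Dict.empty).insert a (-(v a k)) := by
  induction rest generalizing m with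
  | nil => simp at hk
  | cons b t ih =>
    rw [List.foldl_cons]
    rcases List.mem_cons.mp hk with rfl | hkt
    · have hbt : k ∉ t := (List.nodup_cons.mp hnd).1
      rw [pvBlock_getD_of_notmem v a t _ k hka hbt]
      unfold pvStep
      rw [PySem.Dict.getD_modify_self, PySem.Dict.getD_modify_of_ne _ _ _ hka]
    · have hkb : k ≠ b := by
        rintro rfl; exact (List.nodup_cons.mp hnd).1 hkt
      rw [ih _ (List.nodup_cons.mp hnd).2 hkt]
      congr 1
      unfold pvStep
      rw [PySem.Dict.getD_modify_of_ne _ _ _ hkb, PySem.Dict.getD_modify_of_ne _ _ _ hka]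

theorem pvLoopS_getD (v : String → String → Int) (hv : ∀ a b, v a b = -(v b a))
    (els : List String) (m : PySem.Dict String (PySem.Dict String Int)) (k : String)
    (hnd : els.Nodup) :
    (pvLoopS (pvStep v) els m).getD k PySem.Dict.empty =
      if k ∈ els then
        (els.filter (fun b => b != k)).foldl (fun r c => r.insert c (v k c)) (m.getD k PySem.Dict.empty)
      else m.getD k PySem.Dict.empty := by
  induction els generalizing m with
  | nil => simp [pvLoopS]
  | cons a rest ih =>
    obtain ⟨har, hndr⟩ := List.nodup_cons.mp hnd
    show (pvLoopS (pvStep v) rest _).getD k PySem.Dict.empty = _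
    rw [ih _ hndr]
    by_cases hka : k = a
    · subst hka
      have : k ∉ rest := har
      rw [if_neg this, if_pos (by simp)]
      rw [pvBlock_getD_self v k rest m har]
      have hf : rest.filter (fun b => b != k) = rest :=
        List.filter_eq_self.mpr (fun b hb => by
          simp only [bne_iff_ne, ne_eq]
          rintro rfl; exact har hb)
      have hfc : (k :: rest).filter (fun b => b != k) = rest := by
        rw [List.filter_cons, if_neg (by simp)]
        exact hf
      rw [hfc]
    · by_cases hkr : k ∈ rest
      · rw [if_pos hkr, if_pos (by simp [hkr])]
        rw [pvBlock_getD_mem v a rest m k hndr hkr hka]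
        have hv' : -(v a k) = v k a := by rw [hv k a]
        rw [hv']
        have hfc : (a :: rest).filter (fun b => b != k) = a :: rest.filter (fun b => b != k) := by
          rw [List.filter_cons, if_pos (by simp [Ne.symm hka])]
        rw [hfc, List.foldl_cons]
      · rw [if_neg hkr, if_neg (by simp [hka, hkr])]
        exact pvBlock_getD_of_notmem v a rest m k hka hkr

theorem pvStep_keys (v : String → String → Int) (m : PySem.Dict String (PySem.Dict String Int))
    (a b : String) (ha : m.contains a = true) (hb : m.contains b = true) :
    (pvStep v m a b).keys = m.keys := by
  unfold pvStep
  rw [PySem.Dict.keys_modify, PySem.Dict.keys_insert_of_contains]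
  · rw [PySem.Dict.keys_modify, PySem.Dict.keys_insert_of_contains _ _ ha]
  · rw [PySem.Dict.contains_modify]
    simp [hb]

theorem pvBlock_keys (v : String → String → Int) (a : String) (t : List String)
    (m : PySem.Dict String (PySem.Dict String Int)) (ha : m.contains a = true)
    (ht : ∀ b ∈ t, m.contains b = true) :
    (t.foldl (fun m b => pvStep v m a b) m).keys = m.keys := by
  induction t generalizing m with
  | nil => rfl
  | cons b t2 ih =>
    rw [List.foldl_cons]
    have hb := ht b (by simp)
    have hk1 : (pvStep v m a b).keys = m.keys := pvStep_keys v m a b ha hb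
    have hcont : ∀ e, (pvStep v m a b).contains e = true ↔ m.contains e = true := by
      intro e
      rw [PySem.Dict.contains_iff_mem_keys, PySem.Dict.contains_iff_mem_keys, hk1]
    rw [ih (pvStep v m a b) ((hcont a).mpr ha)
      (fun c hc => (hcont c).mpr (ht c (by simp [hc])))]
    exact hk1

theorem pvLoopS_keys (v : String → String → Int) (els : List String)
    (m : PySem.Dict String (PySem.Dict String Int)) (h : ∀ e ∈ els, m.contains e = true) :
    (pvLoopS (pvStep v) els m).keys = m.keys := by
  induction els generalizing m with
  | nil => simp [pvLoopS]
  | cons a rest ih =>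
    show (pvLoopS (pvStep v) rest _).keys = _
    have ha : m.contains a = true := h a (by simp)
    have hrest : ∀ b ∈ rest, m.contains b = true := fun b hb => h b (by simp [hb])
    have hblock := pvBlock_keys v a rest m ha hrest
    have hcont : ∀ e, (rest.foldl (fun m b => pvStep v m a b) m).contains e = true ↔
        m.contains e = true := by
      intro e
      rw [PySem.Dict.contains_iff_mem_keys, PySem.Dict.contains_iff_mem_keys, hblock]
    rw [ih _ (fun b hb => (hcont b).mpr (hrest b hb))]
    exact hblock

-- ---------- the initial matrix {elem: {} for elem in elements} ----------
theorem pvInit_getD (els : List String) (m : PySem.Dict String (PySem.Dict String Int)) (k : String)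
    (h : m.getD k PySem.Dict.empty = PySem.Dict.empty) :
    (els.foldl (fun m e => m.insert e PySem.Dict.empty) m).getD k PySem.Dict.empty = PySem.Dict.empty := by
  induction els generalizing m with
  | nil => simpa using h
  | cons e t ih =>
    rw [List.foldl_cons]
    apply ih
    by_cases hke : k = e
    · subst hke; rw [PySem.Dict.getD_insert_self]
    · rw [PySem.Dict.getD_insert_of_ne _ _ _ hke]; exact h

theorem pvOfList_self {α : Type} [BEq α] [LawfulBEq α] (xs : List α) (h : xs.Nodup) :
    PySem.Set.ofList xs = xs := by
  rw [PySem.Set.ofList_eq_foldl]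
  suffices hgen : ∀ (ys : List α) (s : List α), ys.Nodup → (∀ x ∈ ys, x ∉ s) →
      ys.foldl PySem.Set.add s = s ++ ys by
    simpa using hgen xs [] h (by simp)
  intro ys
  induction ys with
  | nil => intro s _ _; simp
  | cons y t ih =>
    intro s hnd hdisj
    obtain ⟨hyt, hndt⟩ := List.nodup_cons.mp hnd
    rw [List.foldl_cons]
    have hy : PySem.Set.add s y = s ++ [y] := by
      unfold PySem.Set.add
      rw [if_neg (by simpa using hdisj y (by simp))]
    have hdisj' : ∀ x ∈ t, x ∉ s ++ [y] := by
      intro x hx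
      simp only [List.mem_append, List.mem_singleton]
      rintro (hxs | rfl)
      · exact hdisj x (by simp [hx]) hxs
      · exact hyt hx
    rw [hy, ih (s ++ [y]) hndt hdisj']
    rw [List.append_assoc, List.singleton_append]

theorem pvInit_keys (els : List String) (h : els.Nodup) :
    (els.foldl (fun m e => m.insert e (PySem.Dict.empty : PySem.Dict String Int)) PySem.Dict.empty).keys = els := by
  rw [PySem.Dict.keys_foldl_insert els (fun _ _ => PySem.Dict.empty)]
  rw [PySem.Dict.keys_empty]
  show PySem.Set.update [] els = els
  unfold PySem.Set.update
  rw [← PySem.Set.ofList_eq_foldl]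
  exact pvOfList_self els h

-- ---------- characterization of A ----------
theorem pvCompare_antisym (p q : Int × Int) :
    compare_positions p q = -(compare_positions q p) := by
  unfold compare_positions
  split_ifs <;> omega

theorem pvVal_antisym (r1 r2 : List (List String)) (a b : String) :
    pvVal r1 r2 a b = -(pvVal r1 r2 b a) := by
  simp only [pvVal]
  rw [pvCompare_antisym ((get_element_positions r1).getD a (0, 0)) ((get_element_positions r1).getD b (0, 0))]
  rw [pvCompare_antisym ((get_element_positions r2).getD a (0, 0)) ((get_element_positions r2).getD b (0, 0))]
  split_ifs <;> omega

theorem pvCharA (r1 r2 : List (List String)) (els : List String) (hnd : els.Nodup) :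
    create_dominance_matrix r1 r2 els =
      els.map (fun a => (a, (els.filter (fun b => b != a)).map (fun b => (b, pvVal r1 r2 a b)))) := by
  have hconv := pvConv (pvStep (pvVal r1 r2)) els
    (els.foldl (fun m e => m.insert e PySem.Dict.empty) PySem.Dict.empty)
  have hport : create_dominance_matrix r1 r2 els =
      (pvLoopS (pvStep (pvVal r1 r2)) els
        (els.foldl (fun m e => m.insert e PySem.Dict.empty) PySem.Dict.empty)).items.map
        (fun p => (p.1, p.2.items)) := by
    rw [← hconv]
    rfl
  rw [hport]
  have hm0keys : (els.foldl (fun m e => m.insert e (PySem.Dict.empty : PySem.Dict String Int))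
      PySem.Dict.empty).keys = els := pvInit_keys els hnd
  have hm0cont : ∀ e ∈ els, (els.foldl (fun m e => m.insert e (PySem.Dict.empty : PySem.Dict String Int))
      PySem.Dict.empty).contains e = true := by
    intro e he
    rw [PySem.Dict.contains_iff_mem_keys, hm0keys]
    exact he
  have hFkeys : (pvLoopS (pvStep (pvVal r1 r2)) els
      (els.foldl (fun m e => m.insert e PySem.Dict.empty) PySem.Dict.empty)).keys = els := by
    rw [pvLoopS_keys (pvVal r1 r2) els _ hm0cont]
    exact hm0keys
  have hFnd : (pvLoopS (pvStep (pvVal r1 r2)) els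
      (els.foldl (fun m e => m.insert e PySem.Dict.empty) PySem.Dict.empty)).keys.Nodup := by
    rw [hFkeys]; exact hnd
  rw [PySem.Dict.items_eq_map_keys _ hFnd PySem.Dict.empty, hFkeys, List.map_map]
  apply List.map_congr_left
  intro a ha
  simp only [Function.comp_apply]
  congr 1
  rw [pvLoopS_getD (pvVal r1 r2) (pvVal_antisym r1 r2) els _ a hnd, if_pos ha]
  rw [pvInit_getD els PySem.Dict.empty a (by rw [PySem.Dict.getD_empty])]
  have hfresh : ∀ c ∈ els.filter (fun b => b != a),
      (PySem.Dict.empty : PySem.Dict String Int).contains c = false :=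
    fun c _ => PySem.Dict.contains_empty c
  have hndf : ((els.filter (fun b => b != a)).map (fun c => c)).Nodup := by
    simpa using hnd.filter _
  have hitems := PySem.Dict.items_foldl_insert_fresh (els.filter (fun b => b != a))
    (fun c => c) (fun c => pvVal r1 r2 a c) PySem.Dict.empty hfresh hndf
  simpa using hitems

-- ---------- characterization of B ----------
theorem pvCharB (r1 r2 : List (List String)) (els : List String) (hnd : els.Nodup) :
    create_dominance_matrix_alt r1 r2 els =
      els.map (fun a => (a, (els.filter (fun b => b != a)).map (fun b => (b, pvBVal r1 r2 a b)))) := by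
  have hrow : ∀ a,
      (els.foldl (fun row e2 =>
        if e2 == a then row
        else if PySem.Set.contains ((after_sets r1).getD a PySem.Set.empty) e2 &&
                PySem.Set.contains ((after_sets r2).getD a PySem.Set.empty) e2 then row.insert e2 1
        else if PySem.Set.contains ((after_sets r1).getD e2 PySem.Set.empty) a &&
                PySem.Set.contains ((after_sets r2).getD e2 PySem.Set.empty) a then row.insert e2 (-1)
        else row.insert e2 0) (PySem.Dict.empty : PySem.Dict String Int)).items =
      (els.filter (fun b => b != a)).map (fun b => (b, pvBVal r1 r2 a b)) := by
    intro a
    have hcongr : (els.foldl (fun row e2 =>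
        if e2 == a then row
        else if PySem.Set.contains ((after_sets r1).getD a PySem.Set.empty) e2 &&
                PySem.Set.contains ((after_sets r2).getD a PySem.Set.empty) e2 then row.insert e2 1
        else if PySem.Set.contains ((after_sets r1).getD e2 PySem.Set.empty) a &&
                PySem.Set.contains ((after_sets r2).getD e2 PySem.Set.empty) a then row.insert e2 (-1)
        else row.insert e2 0) (PySem.Dict.empty : PySem.Dict String Int)) =
        els.foldl (fun row e2 => if (e2 != a) = true then row.insert e2 (pvBVal r1 r2 a e2) else row)
          PySem.Dict.empty := by
      apply PySem.List.foldl_congr_mem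
      intro acc x hx
      by_cases hxa : x == a
      · simp [hxa, bne]
      · simp only [Bool.not_eq_true] at hxa
        simp only [hxa, Bool.false_eq_true, if_false, bne, Bool.not_false, if_true]
        unfold pvBVal
        split_ifs <;> rfl
    rw [hcongr, PySem.List.foldl_if_eq_foldl_filter]
    have hfresh : ∀ c ∈ els.filter (fun b => b != a),
        (PySem.Dict.empty : PySem.Dict String Int).contains c = false :=
      fun c _ => PySem.Dict.contains_empty c
    have hndf : ((els.filter (fun b => b != a)).map (fun c => c)).Nodup := by
      simpa using hnd.filter _
    have hitems := PySem.Dict.items_foldl_insert_fresh (els.filter (fun b => b != a))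
      (fun c => c) (fun c => pvBVal r1 r2 a c) PySem.Dict.empty hfresh hndf
    simpa using hitems
  have hfresh2 : ∀ e ∈ els, (PySem.Dict.empty : PySem.Dict String (PySem.Dict String Int)).contains e = false :=
    fun e _ => PySem.Dict.contains_empty e
  have hnde : (els.map (fun e => e)).Nodup := by simpa using hnd
  have hitems2 := PySem.Dict.items_foldl_insert_fresh els (fun e => e)
    (fun e1 => els.foldl (fun row e2 =>
        if e2 == e1 then row
        else if PySem.Set.contains ((after_sets r1).getD e1 PySem.Set.empty) e2 &&
                PySem.Set.contains ((after_sets r2).getD e1 PySem.Set.empty) e2 then row.insert e2 1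
        else if PySem.Set.contains ((after_sets r1).getD e2 PySem.Set.empty) e1 &&
                PySem.Set.contains ((after_sets r2).getD e2 PySem.Set.empty) e1 then row.insert e2 (-1)
        else row.insert e2 0) (PySem.Dict.empty : PySem.Dict String Int))
    PySem.Dict.empty hfresh2 hnde
  simp only [] at hitems2
  simp only [create_dominance_matrix_alt]
  rw [hitems2]
  rw [show (PySem.Dict.empty : PySem.Dict String (PySem.Dict String Int)).items = [] from rfl,
    List.nil_append, List.map_map]
  apply List.map_congr_left
  intro a ha
  simp only [Function.comp_apply]
  rw [hrow a]


-- ---------- value-side machinery: positions, linear ranks, after-sets ----------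

-- proof-side companion of get_element_positions: one running counter over the flattened ranking
def linear_ranks (ranking : List (List String)) : PySem.Dict String Int :=
  (ranking.foldl
    (fun (acc : PySem.Dict String Int × Int) cluster =>
      cluster.foldl (fun (acc2 : PySem.Dict String Int × Int) element =>
        (acc2.1.insert element acc2.2, acc2.2 + 1)) acc)
    (PySem.Dict.empty, 0)).1

-- lexicographic order on stored (level, pos) tuples
def pvLexLt (t u : Int × Int) : Prop := t.1 < u.1 ∨ (t.1 = u.1 ∧ t.2 < u.2)

-- Joint invariant of the two position-building folds: same key set; every stored tuple is
-- lex-below the cursor and every stored rank below the counter; lex order of tuples matches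
-- the order of ranks.
def pvInv (pd : PySem.Dict String (Int × Int)) (rd : PySem.Dict String Int)
    (cur : Int × Int) (c : Int) : Prop :=
  (∀ e, (pd.get? e).isSome = (rd.get? e).isSome) ∧
  (∀ e t n, pd.get? e = some t → rd.get? e = some n → pvLexLt t cur ∧ n < c) ∧
  (∀ e e' t t' n n', pd.get? e = some t → rd.get? e = some n →
      pd.get? e' = some t' → rd.get? e' = some n' → (pvLexLt t t' ↔ n < n'))

theorem pvInv_weaken (pd : PySem.Dict String (Int × Int)) (rd : PySem.Dict String Int)
    (cur cur' : Int × Int) (c c' : Int)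
    (h : pvInv pd rd cur c) (h1 : ∀ t, pvLexLt t cur → pvLexLt t cur') (h2 : c ≤ c') :
    pvInv pd rd cur' c' := by
  obtain ⟨a, b, d⟩ := h
  exact ⟨a, fun e t n ht hn => ⟨h1 t (b e t n ht hn).1, lt_of_lt_of_le (b e t n ht hn).2 h2⟩, d⟩

theorem pvInv_insert (pd : PySem.Dict String (Int × Int)) (rd : PySem.Dict String Int)
    (l p c : Int) (x : String) (h : pvInv pd rd (l, p) c) :
    pvInv (pd.insert x (l, p)) (rd.insert x c) (l, p + 1) (c + 1) := by
  obtain ⟨hsome, hbnd, hord⟩ := h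
  refine ⟨?_, ?_, ?_⟩
  · intro e
    by_cases he : e = x
    · subst he; simp [PySem.Dict.get?_insert_self]
    · simp [PySem.Dict.get?_insert_of_ne _ _ he, hsome e]
  · intro e t n ht hn
    by_cases he : e = x
    · subst he
      rw [PySem.Dict.get?_insert_self] at ht hn
      cases ht; cases hn
      constructor
      · right; exact ⟨rfl, by omega⟩
      · omega
    · rw [PySem.Dict.get?_insert_of_ne _ _ he] at ht hn
      obtain ⟨hl, hc⟩ := hbnd e t n ht hn
      refine ⟨?_, by omega⟩
      rcases hl with h' | ⟨h1, h2⟩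
      · left; exact h'
      · right; exact ⟨h1, by omega⟩
  · intro e e' t t' n n' ht hn ht' hn'
    by_cases he : e = x <;> by_cases he' : e' = x
    · subst he; subst he'
      rw [PySem.Dict.get?_insert_self] at ht hn ht' hn'
      cases ht; cases hn; cases ht'; cases hn'
      simp [pvLexLt]
    · subst he
      rw [PySem.Dict.get?_insert_self] at ht hn
      rw [PySem.Dict.get?_insert_of_ne _ _ he'] at ht' hn'
      cases ht; cases hn
      obtain ⟨hl, hc⟩ := hbnd e' t' n' ht' hn'
      constructor
      · intro hlt
        exfalso
        rcases hl with h' | ⟨h1, h2⟩ <;> rcases hlt with h'' | ⟨h3, h4⟩ <;> omega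
      · omega
    · subst he'
      rw [PySem.Dict.get?_insert_self] at ht' hn'
      rw [PySem.Dict.get?_insert_of_ne _ _ he] at ht hn
      cases ht'; cases hn'
      obtain ⟨hl, hc⟩ := hbnd e t n ht hn
      constructor
      · intro _; omega
      · intro _
        rcases hl with h' | ⟨h1, h2⟩
        · left; exact h'
        · right; exact ⟨h1, h2⟩
    · rw [PySem.Dict.get?_insert_of_ne _ _ he] at ht hn
      rw [PySem.Dict.get?_insert_of_ne _ _ he'] at ht' hn'
      exact hord e e' t t' n n' ht hn ht' hn'

-- the two inner (per-cluster) folds preserve pvInv, and record every cluster element as a key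
theorem pvInner (cluster : List String) (pd : PySem.Dict String (Int × Int))
    (rd : PySem.Dict String Int) (l p c : Int) (h : pvInv pd rd (l, p) c) :
    pvInv (cluster.foldl (fun acc2 element => (acc2.1.insert element (l, acc2.2), acc2.2 + 1)) (pd, p)).1
          (cluster.foldl (fun acc2 element => (acc2.1.insert element acc2.2, acc2.2 + 1)) (rd, c)).1
          (l, (cluster.foldl (fun acc2 element => (acc2.1.insert element (l, acc2.2), acc2.2 + 1)) (pd, p)).2)
          (cluster.foldl (fun acc2 element => (acc2.1.insert element acc2.2, acc2.2 + 1)) (rd, c)).2 ∧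
    (cluster.foldl (fun acc2 element => (acc2.1.insert element (l, acc2.2), acc2.2 + 1)) (pd, p)).2 = p + cluster.length ∧
    (cluster.foldl (fun acc2 element => (acc2.1.insert element acc2.2, acc2.2 + 1)) (rd, c)).2 = c + cluster.length ∧
    (∀ e, e ∈ cluster ∨ (pd.get? e).isSome →
      ((cluster.foldl (fun acc2 element => (acc2.1.insert element (l, acc2.2), acc2.2 + 1)) (pd, p)).1.get? e).isSome) := by
  induction cluster generalizing pd rd p c with
  | nil => exact ⟨h, by simp, by simp, fun e he => by simpa using he⟩
  | cons x xs ih =>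
    have h' := pvInv_insert pd rd l p c x h
    obtain ⟨hinv, hlen1, hlen2, hkeys⟩ := ih (pd.insert x (l, p)) (rd.insert x c) (p + 1) (c + 1) h'
    refine ⟨hinv, by simpa [add_comm, add_left_comm, add_assoc] using hlen1,
            by simpa [add_comm, add_left_comm, add_assoc] using hlen2, ?_⟩
    intro e he
    apply hkeys
    rcases he with he | he
    · rcases List.mem_cons.mp he with rfl | hmem
      · right; simp [PySem.Dict.get?_insert_self]
      · left; exact hmem
    · right
      by_cases hex : e = x
      · subst hex; simp [PySem.Dict.get?_insert_self]
      · rwa [PySem.Dict.get?_insert_of_ne _ _ hex]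

-- the outer folds of get_element_positions / linear_ranks preserve pvInv and cover flatten
theorem pvOuter (ranking : List (List String)) (pd : PySem.Dict String (Int × Int))
    (rd : PySem.Dict String Int) (l c : Int) (h : pvInv pd rd (l, 0) c) :
    pvInv (ranking.foldl (fun acc cluster =>
            ((cluster.foldl (fun acc2 element => (acc2.1.insert element (acc.2, acc2.2), acc2.2 + 1)) (acc.1, 0)).1, acc.2 + 1)) (pd, l)).1
          (ranking.foldl (fun acc cluster =>
            cluster.foldl (fun acc2 element => (acc2.1.insert element acc2.2, acc2.2 + 1)) acc) (rd, c)).1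
          ((ranking.foldl (fun acc cluster =>
            ((cluster.foldl (fun acc2 element => (acc2.1.insert element (acc.2, acc2.2), acc2.2 + 1)) (acc.1, 0)).1, acc.2 + 1)) (pd, l)).2, 0)
          (ranking.foldl (fun acc cluster =>
            cluster.foldl (fun acc2 element => (acc2.1.insert element acc2.2, acc2.2 + 1)) acc) (rd, c)).2 ∧
    (∀ e, e ∈ ranking.flatten ∨ (pd.get? e).isSome →
      (((ranking.foldl (fun acc cluster =>
            ((cluster.foldl (fun acc2 element => (acc2.1.insert element (acc.2, acc2.2), acc2.2 + 1)) (acc.1, 0)).1, acc.2 + 1)) (pd, l)).1.get? e)).isSome) := by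
  induction ranking generalizing pd rd l c with
  | nil => exact ⟨h, fun e he => by simpa using he⟩
  | cons cl rest ih =>
    simp only [List.foldl_cons]
    obtain ⟨hinv, hlen1, hlen2, hkeys⟩ := pvInner cl pd rd l 0 c h
    have hinv' : pvInv ((cl.foldl (fun acc2 element => (acc2.1.insert element (l, acc2.2), acc2.2 + 1)) (pd, 0)).1)
        (cl.foldl (fun acc2 element => (acc2.1.insert element acc2.2, acc2.2 + 1)) (rd, c)).1 (l + 1, 0)
        (cl.foldl (fun acc2 element => (acc2.1.insert element acc2.2, acc2.2 + 1)) (rd, c)).2 := by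
      apply pvInv_weaken _ _ _ _ _ _ hinv
      · intro t ht
        rcases ht with h' | ⟨h1, h2⟩
        · left; omega
        · left; omega
      · omega
    obtain ⟨hinv'', hkeys''⟩ := ih _ _ (l + 1) _ hinv'
    constructor
    · exact hinv''
    · intro e he
      apply hkeys''
      rcases he with he | he
      · rw [List.flatten_cons] at he
        rcases List.mem_append.mp he with hm | hm
        · right; exact hkeys e (Or.inl hm)
        · left; exact hm
      · right; exact hkeys e (Or.inr he)

-- full correspondence between get_element_positions and linear_ranks
theorem pvDicts (ranking : List (List String)) :
    (∀ e, ((get_element_positions ranking).get? e).isSome = ((linear_ranks ranking).get? e).isSome) ∧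
    (∀ e e' t t' n n', (get_element_positions ranking).get? e = some t → (linear_ranks ranking).get? e = some n →
      (get_element_positions ranking).get? e' = some t' → (linear_ranks ranking).get? e' = some n' → (pvLexLt t t' ↔ n < n')) ∧
    (∀ e, e ∈ ranking.flatten → ((get_element_positions ranking).get? e).isSome) := by
  have h0 : pvInv PySem.Dict.empty PySem.Dict.empty ((0 : Int), (0 : Int)) 0 := by
    refine ⟨fun e => rfl, fun e t n ht hn => ?_, fun e e' t t' n n' ht => ?_⟩ <;>
      simp [PySem.Dict.get?_empty] at *
  obtain ⟨⟨hsome, _, hord⟩, hkeys⟩ := pvOuter ranking PySem.Dict.empty PySem.Dict.empty 0 0 h0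
  exact ⟨hsome, hord, fun e he => hkeys e (Or.inl (by simpa using he))⟩

-- the comparison A makes equals the sign of the linear-rank difference
theorem pvValue (ranking : List (List String)) (e1 e2 : String)
    (h1 : e1 ∈ ranking.flatten) (h2 : e2 ∈ ranking.flatten) :
    compare_positions ((get_element_positions ranking).getD e1 (0, 0)) ((get_element_positions ranking).getD e2 (0, 0)) =
      (if (linear_ranks ranking).getD e2 0 - (linear_ranks ranking).getD e1 0 > 0 then (1 : Int) else 0) -
      (if (linear_ranks ranking).getD e2 0 - (linear_ranks ranking).getD e1 0 < 0 then 1 else 0) := by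
  obtain ⟨hsome, hord, hkeys⟩ := pvDicts ranking
  have hp1 := hkeys e1 h1
  have hp2 := hkeys e2 h2
  obtain ⟨t1, ht1⟩ := Option.isSome_iff_exists.mp hp1
  obtain ⟨t2, ht2⟩ := Option.isSome_iff_exists.mp hp2
  have hr1 : ((linear_ranks ranking).get? e1).isSome := by rw [← hsome e1]; exact hp1
  have hr2 : ((linear_ranks ranking).get? e2).isSome := by rw [← hsome e2]; exact hp2
  obtain ⟨n1, hn1⟩ := Option.isSome_iff_exists.mp hr1
  obtain ⟨n2, hn2⟩ := Option.isSome_iff_exists.mp hr2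
  rw [PySem.Dict.getD_of_get?_eq_some _ _ ht1, PySem.Dict.getD_of_get?_eq_some _ _ ht2,
      PySem.Dict.getD_of_get?_eq_some _ _ hn1, PySem.Dict.getD_of_get?_eq_some _ _ hn2]
  have h12 := hord e1 e2 t1 t2 n1 n2 ht1 hn1 ht2 hn2
  have h21 := hord e2 e1 t2 t1 n2 n1 ht2 hn2 ht1 hn1
  simp only [pvLexLt] at h12 h21
  simp only [compare_positions, gt_iff_lt]
  obtain ⟨l1, p1⟩ := t1
  obtain ⟨l2, p2⟩ := t2
  simp only at h12 h21 ⊢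
  split_ifs <;> omega

-- ---------- last-occurrence indices in the flattened ranking ----------
def pvLastIdx (xs : List String) (e : String) : Nat := xs.length - 1 - xs.reverse.idxOf e

theorem pvLastIdx_cons_mem (x : String) (t : List String) (e : String) (h : e ∈ t) :
    pvLastIdx (x :: t) e = pvLastIdx t e + 1 := by
  unfold pvLastIdx
  rw [List.reverse_cons, List.idxOf_append, if_pos (by simpa using h)]
  have hidx : t.reverse.idxOf e < t.reverse.length :=
    List.idxOf_lt_length_of_mem (by simpa using h)
  simp only [List.length_cons, List.length_reverse] at *
  omega

theorem pvLastIdx_cons_self (x : String) (t : List String) (h : x ∉ t) :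
    pvLastIdx (x :: t) x = 0 := by
  unfold pvLastIdx
  rw [List.reverse_cons, List.idxOf_append, if_neg (by simpa using h)]
  simp [List.idxOf_cons_self]

theorem pvLastIdx_lt (xs : List String) (e : String) (h : e ∈ xs) :
    pvLastIdx xs e < xs.length := by
  unfold pvLastIdx
  have := List.length_pos_of_mem h
  omega

theorem pvLastIdx_getElem (xs : List String) (e : String) (h : e ∈ xs) :
    xs[pvLastIdx xs e]'(pvLastIdx_lt xs e h) = e := by
  have hm : e ∈ xs.reverse := by simpa using h
  have hidx : xs.reverse.idxOf e < xs.reverse.length := List.idxOf_lt_length_of_mem hm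
  have h1 : xs.reverse[xs.reverse.idxOf e]'hidx = e := List.getElem_idxOf hidx
  rw [List.getElem_reverse] at h1
  exact h1

theorem pvLastIdx_inj (xs : List String) (a b : String) (ha : a ∈ xs) (hb : b ∈ xs)
    (h : pvLastIdx xs a = pvLastIdx xs b) : a = b := by
  have h1' : xs[pvLastIdx xs a]? = some a := by
    rw [List.getElem?_eq_getElem (pvLastIdx_lt xs a ha), pvLastIdx_getElem xs a ha]
  have h2' : xs[pvLastIdx xs b]? = some b := by
    rw [List.getElem?_eq_getElem (pvLastIdx_lt xs b hb), pvLastIdx_getElem xs b hb]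
  rw [h] at h1'
  rw [h1'] at h2'
  exact Option.some_inj.mp h2'

-- the counter fold stores each key's last index, offset by the starting counter
theorem pvRankAux (xs : List String) (d : PySem.Dict String Int) (c : Int) (e : String) :
    ((xs.foldl (fun (acc2 : PySem.Dict String Int × Int) x => (acc2.1.insert x acc2.2, acc2.2 + 1)) (d, c)).1).get? e
      = if e ∈ xs then some (c + (pvLastIdx xs e : Int)) else d.get? e := by
  induction xs generalizing d c with
  | nil => simp
  | cons x t ih =>
    rw [List.foldl_cons]
    by_cases het : e ∈ t
    · rw [ih, if_pos het, if_pos (by simp [het])]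
      rw [pvLastIdx_cons_mem x t e het]
      congr 1
      push_cast
      ring
    · by_cases hex : e = x
      · subst hex
        rw [ih, if_neg het, if_pos (by simp), PySem.Dict.get?_insert_self,
          pvLastIdx_cons_self e t het]
        simp
      · rw [ih, if_neg het, if_neg (by simp [hex, het]), PySem.Dict.get?_insert_of_ne _ _ hex]

theorem pvLinear_eq_flat (r : List (List String)) :
    linear_ranks r =
      ((r.flatten).foldl (fun (acc2 : PySem.Dict String Int × Int) x =>
        (acc2.1.insert x acc2.2, acc2.2 + 1)) (PySem.Dict.empty, 0)).1 := by
  unfold linear_ranks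
  rw [List.foldl_flatten]

theorem pvLinear_get? (r : List (List String)) (e : String) :
    (linear_ranks r).get? e =
      if e ∈ r.flatten then some ((pvLastIdx r.flatten e : Int)) else none := by
  rw [pvLinear_eq_flat, pvRankAux]
  by_cases h : e ∈ r.flatten <;> simp [h, PySem.Dict.get?_empty]

-- A's comparison, in terms of last-occurrence indices
theorem pvCompare_eq (r : List (List String)) (a b : String) (hab : a ≠ b)
    (ha : a ∈ r.flatten) (hb : b ∈ r.flatten) :
    compare_positions ((get_element_positions r).getD a (0, 0)) ((get_element_positions r).getD b (0, 0)) =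
      if pvLastIdx r.flatten a < pvLastIdx r.flatten b then 1 else -1 := by
  have hga : (linear_ranks r).getD a 0 = (pvLastIdx r.flatten a : Int) := by
    have h := pvLinear_get? r a
    rw [if_pos ha] at h
    exact PySem.Dict.getD_of_get?_eq_some _ _ h
  have hgb : (linear_ranks r).getD b 0 = (pvLastIdx r.flatten b : Int) := by
    have h := pvLinear_get? r b
    rw [if_pos hb] at h
    exact PySem.Dict.getD_of_get?_eq_some _ _ h
  have hne : pvLastIdx r.flatten a ≠ pvLastIdx r.flatten b :=
    fun h => hab (pvLastIdx_inj r.flatten a b ha hb h)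
  rw [pvValue r a b ha hb, hga, hgb]
  split_ifs <;> omega

-- ---------- the after-set fold of B ----------
def pvAStep (acc : PySem.Dict String (PySem.Set String) × PySem.Set String) (e : String) :
    PySem.Dict String (PySem.Set String) × PySem.Set String :=
  (if acc.1.contains e then acc.1 else acc.1.insert e (PySem.Set.ofList acc.2),
   PySem.Set.add acc.2 e)

theorem pvAfterAux (l : List String) :
    ∀ (d : PySem.Dict String (PySem.Set String)) (s : PySem.Set String),
    (∀ e, d.contains e = true → ((l.foldl pvAStep (d, s)).1).get? e = d.get? e) ∧
    (∀ e, e ∈ l → d.contains e = false →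
      ∃ w, ((l.foldl pvAStep (d, s)).1).get? e = some w ∧
        ∀ x, x ∈ w ↔ x ∈ s ∨ x ∈ l.takeWhile (fun y => y != e)) := by
  induction l with
  | nil =>
    intro d s
    exact ⟨fun e _ => rfl, fun e he => by simp at he⟩
  | cons y t ih =>
    intro d s
    rw [List.foldl_cons]
    by_cases hdy : d.contains y = true
    · have hstep : pvAStep (d, s) y = (d, PySem.Set.add s y) := by
        simp [pvAStep, hdy]
      rw [hstep]
      obtain ⟨ih1, ih2⟩ := ih d (PySem.Set.add s y)
      refine ⟨ih1, ?_⟩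
      intro e hel hde
      have hey : e ≠ y := fun h => by rw [h] at hde; rw [hde] at hdy; exact Bool.noConfusion hdy
      have het : e ∈ t := by
        rcases List.mem_cons.mp hel with h | h
        · exact absurd h hey
        · exact h
      obtain ⟨w, hw, hm⟩ := ih2 e het hde
      refine ⟨w, hw, fun x => ?_⟩
      rw [hm x, List.takeWhile_cons, if_pos (by simp [Ne.symm hey])]
      rw [PySem.Set.mem_add]
      simp only [List.mem_cons]
      tauto
    · have hdy' : d.contains y = false := by simpa using hdy
      have hstep : pvAStep (d, s) y = (d.insert y (PySem.Set.ofList s), PySem.Set.add s y) := by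
        simp [pvAStep, hdy']
      rw [hstep]
      obtain ⟨ih1, ih2⟩ := ih (d.insert y (PySem.Set.ofList s)) (PySem.Set.add s y)
      constructor
      · intro e hde
        have hey : e ≠ y := fun h => by rw [h] at hde; rw [hde] at hdy'; exact Bool.noConfusion hdy'
        have hd'e : (d.insert y (PySem.Set.ofList s)).contains e = true := by
          rw [PySem.Dict.contains_insert]
          simp [hde]
        rw [ih1 e hd'e, PySem.Dict.get?_insert_of_ne _ _ hey]
      · intro e hel hde
        by_cases hey : e = y
        · subst hey
          have hd'e : (d.insert e (PySem.Set.ofList s)).contains e = true := by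
            rw [PySem.Dict.contains_insert]
            simp
          refine ⟨PySem.Set.ofList s, ?_, ?_⟩
          · rw [ih1 e hd'e, PySem.Dict.get?_insert_self]
          · intro x
            rw [List.takeWhile_cons, if_neg (by simp)]
            rw [PySem.Set.mem_ofList]
            simp
        · have het : e ∈ t := by
            rcases List.mem_cons.mp hel with h | h
            · exact absurd h hey
            · exact h
          have hd'e : (d.insert y (PySem.Set.ofList s)).contains e = false := by
            rw [PySem.Dict.contains_insert]
            simp [hde, hey]
          obtain ⟨w, hw, hm⟩ := ih2 e het hd'e
          refine ⟨w, hw, fun x => ?_⟩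
          rw [hm x, List.takeWhile_cons, if_pos (by simp [Ne.symm hey])]
          rw [PySem.Set.mem_add]
          simp only [List.mem_cons]
          tauto

theorem pvAfterGet (r : List (List String)) (e : String) (he : e ∈ r.flatten) :
    ∃ w, (after_sets r).get? e = some w ∧
      ∀ x, x ∈ w ↔ x ∈ (r.flatten.reverse).takeWhile (fun y => y != e) := by
  have hfm : after_sets r = ((r.flatten.reverse).foldl pvAStep (PySem.Dict.empty, PySem.Set.empty)).1 := by
    unfold after_sets pvAStep
    rw [show (r.flatMap fun cluster => cluster) = r.flatten from by simp]
  obtain ⟨w, hw, hm⟩ := (pvAfterAux (r.flatten.reverse) PySem.Dict.empty PySem.Set.empty).2 e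
    (by simpa using he) (PySem.Dict.contains_empty e)
  refine ⟨w, ?_, fun x => ?_⟩
  · rw [hfm]; exact hw
  · rw [hm x]
    simp [PySem.Set.empty]

theorem pvMemTakeWhile (l : List String) (a b : String) (hab : b ≠ a) (hb : b ∈ l) :
    (b ∈ l.takeWhile (fun y => y != a)) ↔ l.idxOf b < l.idxOf a := by
  induction l with
  | nil => simp at hb
  | cons y t ih =>
    by_cases hya : y = a
    · subst hya
      rw [List.takeWhile_cons, if_neg (by simp)]
      simp [List.idxOf_cons_self]
    · by_cases hyb : y = b
      · subst hyb
        rw [List.takeWhile_cons, if_pos (by simp [hab])]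
        rw [List.idxOf_cons_self, List.idxOf_cons_ne t hya]
        simp
      · have hbt : b ∈ t := by
          rcases List.mem_cons.mp hb with h | h
          · exact absurd h.symm hyb
          · exact h
        rw [List.takeWhile_cons, if_pos (by simp [hya])]
        rw [List.idxOf_cons_ne t hyb, List.idxOf_cons_ne t hya]
        simp only [List.mem_cons]
        rw [Nat.succ_lt_succ_iff]
        constructor
        · rintro (h | h)
          · exact absurd h.symm hyb
          · exact (ih hbt).mp h
        · intro h
          right
          exact (ih hbt).mpr h

theorem pvBContains (r : List (List String)) (a b : String) (hab : a ≠ b)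
    (ha : a ∈ r.flatten) (hb : b ∈ r.flatten) :
    PySem.Set.contains ((after_sets r).getD a PySem.Set.empty) b =
      decide (pvLastIdx r.flatten a < pvLastIdx r.flatten b) := by
  obtain ⟨w, hw, hm⟩ := pvAfterGet r a ha
  rw [PySem.Dict.getD_of_get?_eq_some _ _ hw]
  have hcm : PySem.Set.contains w b = decide (b ∈ w) := by
    simp [PySem.Set.contains, List.contains_eq_mem]
  rw [hcm]
  simp only [decide_eq_decide]
  rw [hm b]
  rw [pvMemTakeWhile r.flatten.reverse a b (Ne.symm hab) (by simpa using hb)]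
  have hia : r.flatten.reverse.idxOf a < r.flatten.length := by
    have := List.idxOf_lt_length_of_mem (l := r.flatten.reverse) (a := a) (by simpa using ha)
    simpa using this
  have hib : r.flatten.reverse.idxOf b < r.flatten.length := by
    have := List.idxOf_lt_length_of_mem (l := r.flatten.reverse) (a := b) (by simpa using hb)
    simpa using this
  unfold pvLastIdx
  constructor <;> intro h <;> omega


-- ---------- per-pair value agreement (elements present in both rankings) ----------
theorem pvValAgree (r1 r2 : List (List String)) (a b : String) (hab : a ≠ b)
    (ha1 : a ∈ r1.flatten) (ha2 : a ∈ r2.flatten) (hb1 : b ∈ r1.flatten) (hb2 : b ∈ r2.flatten) :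
    pvVal r1 r2 a b = pvBVal r1 r2 a b := by
  unfold pvVal pvBVal
  rw [pvCompare_eq r1 a b hab ha1 hb1, pvCompare_eq r2 a b hab ha2 hb2]
  rw [pvBContains r1 a b hab ha1 hb1, pvBContains r2 a b hab ha2 hb2]
  rw [pvBContains r1 b a (Ne.symm hab) hb1 ha1, pvBContains r2 b a (Ne.symm hab) hb2 ha2]
  have hne1 : pvLastIdx r1.flatten a ≠ pvLastIdx r1.flatten b :=
    fun h => hab (pvLastIdx_inj r1.flatten a b ha1 hb1 h)
  have hne2 : pvLastIdx r2.flatten a ≠ pvLastIdx r2.flatten b :=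
    fun h => hab (pvLastIdx_inj r2.flatten a b ha2 hb2 h)
  by_cases h1 : pvLastIdx r1.flatten a < pvLastIdx r1.flatten b <;>
    by_cases h2 : pvLastIdx r2.flatten a < pvLastIdx r2.flatten b <;>
    simp only [h1, h2, if_true, if_false, decide_true, decide_false] <;>
    split_ifs <;> simp_all <;> omega

-- ===== VERDICT (by name: the statement is the Claim_ definition above) =====
theorem create_dominance_matrix_spec : Claim_equal_create_dominance_matrix := by
  intro r1 r2 els _ hpre
  obtain ⟨hnd, hpre⟩ := hpre
  unfold Spec_create_dominance_matrix
  rw [pvCharA r1 r2 els hnd, pvCharB r1 r2 els hnd]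
  apply List.map_congr_left
  intro a ha
  rcases hpre with hle | hmem
  · -- at most one element: every filtered row is empty
    interval_cases h : els.length
    · simp_all
    · obtain ⟨x, hx⟩ := List.length_eq_one_iff.mp h
      subst hx
      simp_all
  · congr 1
    apply List.map_congr_left
    intro b hb
    have hb' := List.mem_filter.mp hb
    have hab : b ≠ a := by simpa using hb'.2
    obtain ⟨ha1, ha2⟩ := hmem a ha
    obtain ⟨hb1, hb2⟩ := hmem b hb'.1
    exact congrArg (fun z => ((b : String), z)) (pvValAgree r1 r2 a b hab.symm ha1 ha2 hb1 hb2)
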